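-- pv_equiv track=rewrite | github.com/Devang-25/Google-Kickstart-CodeJam-2018-2019 | 2019_1B1/main.py | remaining
-- ===== SOURCE A (Python) =====
-- def remaining(adversaires,i,program):
--     P = []
--     R = []
--     S = []
--     for s,n in adversaires:
--         c = s[i%n]
--         if(c=='P'):
--             P.append((s,n))
--         elif(c=='R'):
--             R.append((s,n))
--         else:
--             S.append((s,n))
--     empty = 0
--     moveEmpty = []
--     if(P==[]):
--         empty+=1
--         moveEmpty.append('P')
--     if(R==[]):
--         empty+=1
--         moveEmpty.append('R')
--     if(S==[]):
--         empty+=1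
--         moveEmpty.append('S')
--
--     if(empty==0):
--         return(False,adversaires,program)
--     elif(empty==2):
--         if(not('P' in moveEmpty)):
--             return(True,[],program+'S')
--         elif(not('R' in moveEmpty)):
--             return(True,[],program+'P')
--         else:
--             return(True,[],program+'R')
--     else:
--         if(moveEmpty==['P']):
--             return(True,R,program+'R')
--         elif(moveEmpty==['R']):
--             return(True,S,program+'S')
--         else:
--             return(True,P,program+'P')
-- ===== SOURCE B (Python) =====
-- def remaining(adversaires, i, program):
--     # one pass: the set of distinct moves present (anything not 'P'/'R' counts as 'S', as in A)
--     moves = {s[i % n] if s[i % n] in ('P', 'R') else 'S' for s, n in adversaires}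
--     if 'P' in moves and 'R' in moves and 'S' in moves:
--         return (False, adversaires, program)
--     beats = {'P': 'R', 'R': 'S', 'S': 'P'}  # m beats beats[m]
--     # play the move whose prey is present and whose predator is absent
--     move = next(m for m in 'PRS' if beats[m] in moves and beats[beats[m]] not in moves)
--     survivors = [(s, n) for s, n in adversaires
--                  if (s[i % n] if s[i % n] in ('P', 'R') else 'S') == move]
--     return (True, survivors, program + move)
-- ===== Notes on version B (the rewrite author's own statement) =====
-- stated objective: simpler
-- what changed: B replaces A's three explicit buckets plus empty-counter/moveEmpty branch chain by a one-pass set of present moves, a cyclic beats-map rule ('play the move whose prey is present and whose predator is absent') and a single filter for the survivors.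
-- outside the precondition, e.g. on remaining([], 0, 'x'): A returns (True, [], 'xP'), B raises StopIteration
import Mathlib
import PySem

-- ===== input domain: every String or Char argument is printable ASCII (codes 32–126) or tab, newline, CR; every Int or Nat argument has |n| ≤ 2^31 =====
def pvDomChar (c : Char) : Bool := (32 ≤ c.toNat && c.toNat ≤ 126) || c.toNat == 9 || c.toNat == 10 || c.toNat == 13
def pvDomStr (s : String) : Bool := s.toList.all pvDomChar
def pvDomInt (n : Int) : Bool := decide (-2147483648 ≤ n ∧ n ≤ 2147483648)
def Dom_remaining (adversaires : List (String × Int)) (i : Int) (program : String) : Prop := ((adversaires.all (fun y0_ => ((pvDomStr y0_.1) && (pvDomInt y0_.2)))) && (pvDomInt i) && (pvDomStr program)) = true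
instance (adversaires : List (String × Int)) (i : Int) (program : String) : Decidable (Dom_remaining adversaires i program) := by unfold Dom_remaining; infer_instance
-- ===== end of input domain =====

-- B replaces A's three buckets + empty-counter branch chain by a one-pass set of present
-- moves, a cyclic beats-map rule, and a single filter for the survivors (objective: simpler).
-- Pre_ excludes empty adversaires, where A's appended 'P' is an artefact of its branch
-- order and B's generator naturally raises StopIteration.


-- ===== PORT A =====
-- one bucketing step of A's loop: c = s[i%n]; append (s,n) to P, R or S
def pvStepA (i : Int) (st : List (String × Int) × List (String × Int) × List (String × Int))
    (p : String × Int) : List (String × Int) × List (String × Int) × List (String × Int) :=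
  match PySem.Str.pyGet? p.1 (PySem.Int.mod i p.2) with
  | some c =>
      if c = 'P' then (st.1 ++ [p], st.2.1, st.2.2)
      else if c = 'R' then (st.1, st.2.1 ++ [p], st.2.2)
      else (st.1, st.2.1, st.2.2 ++ [p])
  | none => st   -- IndexError / ZeroDivisionError in Python: excluded by Pre_remaining

def remaining (adversaires : List (String × Int)) (i : Int) (program : String) : Bool × (List (String × Int)) × String :=
  let st := adversaires.foldl (pvStepA i) ([], [], [])
  let P := st.1
  let R := st.2.1
  let S := st.2.2
  let e1 : Int × List Char := if P = [] then (0 + 1, [] ++ ['P']) else (0, [])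
  let e2 : Int × List Char := if R = [] then (e1.1 + 1, e1.2 ++ ['R']) else e1
  let e3 : Int × List Char := if S = [] then (e2.1 + 1, e2.2 ++ ['S']) else e2
  let empty := e3.1
  let moveEmpty := e3.2
  if empty = 0 then (false, adversaires, program)
  else if empty = 2 then
    if ¬ ('P' ∈ moveEmpty) then (true, [], program ++ "S")
    else if ¬ ('R' ∈ moveEmpty) then (true, [], program ++ "P")
    else (true, [], program ++ "R")
  else
    if moveEmpty = ['P'] then (true, R, program ++ "R")
    else if moveEmpty = ['R'] then (true, S, program ++ "S")
    else (true, P, program ++ "P")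

-- ===== PORT B =====
-- the move an adversary shows: s[i % n] if it is 'P' or 'R', else 'S' (as in Source B)
def pvCls (i : Int) (p : String × Int) : Char :=
  match PySem.Str.pyGet? p.1 (PySem.Int.mod i p.2) with
  | some c => if c = 'P' ∨ c = 'R' then c else 'S'
  | none => 'S'   -- IndexError / ZeroDivisionError in Python: excluded by Pre_remaining

-- the dict literal {'P':'R','R':'S','S':'P'} of Source B as a function: m beats pvBeats m
def pvBeats (m : Char) : Char := if m = 'P' then 'R' else if m = 'R' then 'S' else 'P'

def remaining_alt (adversaires : List (String × Int)) (i : Int) (program : String) : Bool × (List (String × Int)) × String :=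
  let moves : PySem.Set Char := PySem.Set.ofList (adversaires.map (pvCls i))
  if 'P' ∈ moves ∧ 'R' ∈ moves ∧ 'S' ∈ moves then (false, adversaires, program)
  else
    -- next(m for m in 'PRS' if beats[m] in moves and beats[beats[m]] not in moves)
    let ok : Char → Prop := fun m => pvBeats m ∈ moves ∧ pvBeats (pvBeats m) ∉ moves
    have : DecidablePred ok := fun m => by unfold ok; infer_instance
    let move : Char := if ok 'P' then 'P' else if ok 'R' then 'R' else 'S'
    (true, adversaires.filter (fun p => pvCls i p = move), program ++ String.mk [move])

-- ===== PRECONDITION & SPEC =====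
-- Pre_ excludes (a) inputs where A raises: some n = 0 (ZeroDivisionError) or s[i % n] out of
-- range (IndexError); and (b) empty adversaires, where A's appended 'P' is an artefact of its
-- branch order and B's generator naturally raises StopIteration (see claim cites).
def Pre_remaining (adversaires : List (String × Int)) (i : Int) (program : String) : Prop :=
  adversaires ≠ [] ∧ ∀ p ∈ adversaires, p.2 ≠ 0 ∧ (PySem.Str.pyGet? p.1 (PySem.Int.mod i p.2)).isSome

instance (adversaires : List (String × Int)) (i : Int) (program : String) : Decidable (Pre_remaining adversaires i program) := by unfold Pre_remaining; infer_instance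

def pvWitness_remaining : (List (String × Int)) × Int × String := ([("PRS", 3), ("RRR", 1)], 1, "X")

def Spec_remaining (adversaires : List (String × Int)) (i : Int) (program : String) (out : Bool × (List (String × Int)) × String) : Prop := out = remaining_alt adversaires i program
instance (adversaires : List (String × Int)) (i : Int) (program : String) (out : Bool × (List (String × Int)) × String) : Decidable (Spec_remaining adversaires i program out) := by unfold Spec_remaining; infer_instance

-- ===== CLAIM (what is proved, stated in full; the proofs are below) =====
def Claim_equal_remaining : Prop := ∀ (adversaires : List (String × Int)) (i : Int) (program : String), Dom_remaining adversaires i program → Pre_remaining adversaires i program → Spec_remaining adversaires i program (remaining adversaires i program)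

-- ===== LEMMAS AND PROOFS =====

-- A's bucketing loop computes the three filters by pvCls (under Pre_: every index in range)
theorem pvFoldA (i : Int) (xs : List (String × Int)) (P R S : List (String × Int))
    (h : ∀ p ∈ xs, (PySem.Str.pyGet? p.1 (PySem.Int.mod i p.2)).isSome) :
    xs.foldl (pvStepA i) (P, R, S) =
      (P ++ xs.filter (fun p => pvCls i p = 'P'),
       R ++ xs.filter (fun p => pvCls i p = 'R'),
       S ++ xs.filter (fun p => pvCls i p = 'S')) := by
  induction xs generalizing P R S with
  | nil => simp
  | cons q xs ih =>
    have hq := h q (List.mem_cons_self ..)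
    have hxs : ∀ p ∈ xs, (PySem.Str.pyGet? p.1 (PySem.Int.mod i p.2)).isSome :=
      fun p hp => h p (List.mem_cons_of_mem _ hp)
    obtain ⟨c, hc⟩ := Option.isSome_iff_exists.mp hq
    simp only [List.foldl_cons, ih _ _ _ hxs, pvStepA, pvCls, hc, List.filter_cons]
    by_cases h1 : c = 'P'
    · simp [h1]
    · by_cases h2 : c = 'R' <;> simp [h1, h2]

theorem pvMemMoves (i : Int) (xs : List (String × Int)) (c : Char) :
    c ∈ PySem.Set.ofList (xs.map (pvCls i)) ↔ ¬ xs.filter (fun p => pvCls i p = c) = [] := by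
  simp [PySem.Set.mem_ofList, List.filter_eq_nil_iff]

theorem pvClsCases (i : Int) (p : String × Int) :
    pvCls i p = 'P' ∨ pvCls i p = 'R' ∨ pvCls i p = 'S' := by
  unfold pvCls
  rcases PySem.Str.pyGet? p.1 (PySem.Int.mod i p.2) with _ | c
  · simp
  · by_cases h1 : c = 'P' <;> by_cases h2 : c = 'R' <;> simp [h1, h2]

-- ===== VERDICT (by name: the statement is the Claim_ definition above) =====
theorem remaining_spec : Claim_equal_remaining := by
  intro adv i prog _ hpre
  obtain ⟨hne, hpre⟩ := hpre
  unfold Spec_remaining remaining remaining_alt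
  rw [pvFoldA i adv [] [] [] (fun p hp => (hpre p hp).2)]
  rw [if_congr (Iff.and (pvMemMoves i adv 'P') (Iff.and (pvMemMoves i adv 'R') (pvMemMoves i adv 'S'))) rfl rfl]
  simp only [pvMemMoves]
  by_cases hP : adv.filter (fun p => pvCls i p = 'P') = [] <;>
  by_cases hR : adv.filter (fun p => pvCls i p = 'R') = [] <;>
  by_cases hS : adv.filter (fun p => pvCls i p = 'S') = [] <;>
    simp [hP, hR, hS, pvBeats]
  -- the surviving goals are either string literals ("R" = String.mk ['R'], closed by rfl)
  -- or the impossible case where all three filters are empty although adv ≠ []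
  all_goals first
    | rfl
    | (obtain ⟨q, hq⟩ := List.exists_mem_of_ne_nil adv hne
       rcases pvClsCases i q with h | h | h
       · exact absurd h (by simpa using List.filter_eq_nil_iff.mp hP q hq)
       · exact absurd h (by simpa using List.filter_eq_nil_iff.mp hR q hq)
       · exact absurd h (by simpa using List.filter_eq_nil_iff.mp hS q hq))
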